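-- pv_equiv track=rewrite | github.com/rajeshmessi10/rajeshmessi10 | permutationsandcomb.py | pc
-- ===== SOURCE A (Python) =====
-- def pc(str1):
--
--     new = [] # list for first appraoch
--     m = [] # list to reverse string and append
--     st = ""
--     lis = list(str1)
--     for i in range(0,len(str1)):
--         for j in  range(i + 1 , len(str1)):
--             lis[i] , lis[j] = lis[j] , lis[i]
--             new.append("".join(lis))
--             m.append("".join(lis[::-1]))
--             lis = list(str1)
--
--
--     return new + m
-- ===== SOURCE B (Python) =====
-- def _inner(prefix, c, mid, rest):
--     # one swap partner per split of rest: prefix + d + mid + c + tail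
--     if not rest:
--         return []
--     d, tail = rest[0], rest[1:]
--     return [prefix + d + mid + c + tail] + _inner(prefix, c, mid + d, tail)
--
--
-- def _swaps(prefix, rest):
--     # recurse over the string structure: pick each char c as the left swap element
--     if not rest:
--         return []
--     c, tail = rest[0], rest[1:]
--     return _inner(prefix, c, "", tail) + _swaps(prefix + c, tail)
--
--
-- def pc(str1):
--     new = _swaps("", str1)
--     return new + [t[::-1] for t in new]
-- ===== Notes on version B (the rewrite author's own statement) =====
-- stated objective: alternative
-- what changed: B replaces A's nested index loops over a mutable character list (swap two positions, join, reset) by structural recursion on the string with prefix/mid accumulators that builds each result purely by concatenation with no indices or swapping, and derives the reversed half afterwards from the already-built list.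
import Mathlib
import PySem

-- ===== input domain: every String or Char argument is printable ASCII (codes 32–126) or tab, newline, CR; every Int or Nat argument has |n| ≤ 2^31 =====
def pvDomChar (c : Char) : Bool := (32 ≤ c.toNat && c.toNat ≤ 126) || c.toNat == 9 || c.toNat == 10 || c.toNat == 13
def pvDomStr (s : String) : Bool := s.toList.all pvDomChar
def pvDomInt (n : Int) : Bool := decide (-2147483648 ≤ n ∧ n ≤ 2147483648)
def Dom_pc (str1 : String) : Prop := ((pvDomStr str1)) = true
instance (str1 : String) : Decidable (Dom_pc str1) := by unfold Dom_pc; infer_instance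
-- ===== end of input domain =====

-- B replaces A's index-pair loops over a mutable, reset character list by structural
-- recursion on the string (prefix/mid accumulators, each result built by concatenation,
-- no indices, no swapping), with the reversed half derived from the built list afterwards
-- (objective: alternative decomposition; same output and order).

-- ===== PORT A =====
-- state: (new, m, lis); "".join of a character list is String.ofList (exact);
-- lis[i], lis[j] = lis[j], lis[i] via pyGetD/pySetD (indices from the ranges are in bounds);
-- lis[::-1] is the reverse.
def pc (str1 : String) : List String :=
  let n : Int := PySem.Str.len str1
  let st :=
    (PySem.List.pyRange 0 n 1).foldl
      (fun (st : List String × List String × List Char) i =>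
        (PySem.List.pyRange (i + 1) n 1).foldl
          (fun (st2 : List String × List String × List Char) j =>
            let lis := st2.2.2
            let vi := PySem.List.pyGetD lis i ' '
            let vj := PySem.List.pyGetD lis j ' '
            let lis' := PySem.List.pySetD (PySem.List.pySetD lis i vj) j vi
            (st2.1 ++ [String.ofList lis'],
             st2.2.1 ++ [String.ofList lis'.reverse],
             str1.toList))
          st)
      ([], [], str1.toList)
  st.1 ++ st.2.1

-- ===== PORT B =====
-- _inner(prefix, c, mid, rest): one result per split of rest, built by concatenation
def pcInner (p : List Char) (c : Char) (m rest : List Char) : List String :=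
  match rest with
  | [] => []
  | d :: tail => String.ofList (p ++ [d] ++ m ++ [c] ++ tail) :: pcInner p c (m ++ [d]) tail

-- _swaps(prefix, rest): recursion over the string structure
def pcSwaps (p rest : List Char) : List String :=
  match rest with
  | [] => []
  | c :: tail => pcInner p c [] tail ++ pcSwaps (p ++ [c]) tail

-- new = _swaps("", str1); return new + [t[::-1] for t in new]
def pc_alt (str1 : String) : List String :=
  let new := pcSwaps [] str1.toList
  new ++ new.map (fun t => String.ofList t.toList.reverse)

-- ===== PRECONDITION & SPEC =====
def Spec_pc (str1 : String) (out : List String) : Prop := out = pc_alt str1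
instance (str1 : String) (out : List String) : Decidable (Spec_pc str1 out) := by unfold Spec_pc; infer_instance

-- ===== CLAIM (what is proved, stated in full; the proofs are below) =====
def Claim_equal_pc : Prop := ∀ (str1 : String), Dom_pc str1 → Spec_pc str1 (pc str1)

-- ===== LEMMAS AND PROOFS =====

-- A's swapped list (the pair-swap entry for indices i < j of s) as a plain function
def pvSwapA (s : List Char) (i j : Int) : List Char :=
  PySem.List.pySetD (PySem.List.pySetD s i (PySem.List.pyGetD s j ' ')) j (PySem.List.pyGetD s i ' ')

-- the common normal form both programs' (i,k)-th character list reduces to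
def pvEntry (s : List Char) (i k : Nat) : List Char :=
  s.take i ++ [(s.drop (i+1)).getD k ' '] ++ (s.drop (i+1)).take k
    ++ [s.getD i ' '] ++ (s.drop (i+1)).drop (k+1)

-- swapping two in-bounds positions IS the take/drop decomposition
theorem pvSwap_eq_entry (s : List Char) (a k : Nat) (hbn : a + 1 + k < s.length) :
    pvSwapA s (a : Int) ((a + 1 + k : Nat) : Int) = pvEntry s a k := by
  set b := a + 1 + k with hb
  have hab : a < b := by omega
  have han : a < s.length := by omega
  unfold pvSwapA pvEntry
  have hgb : PySem.List.pyGetD s (b : Int) ' ' = s[b] := by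
    simp [List.getD_eq_getElem?_getD, List.getElem?_eq_getElem hbn]
  have hga : PySem.List.pyGetD s (a : Int) ' ' = s[a] := by
    simp [List.getD_eq_getElem?_getD, List.getElem?_eq_getElem han]
  rw [hgb, hga]
  simp only [PySem.List.pySetD_natCast]
  have hX : s.set a s[b] = s.take a ++ s[b] :: s.drop (a + 1) :=
    List.set_eq_take_cons_drop _ han
  have hlen : (s.set a s[b]).length = s.length := by simp
  have hY : (s.set a s[b]).set b s[a] =
      (s.set a s[b]).take b ++ s[a] :: (s.set a s[b]).drop (b + 1) :=
    List.set_eq_take_cons_drop _ (by simpa [hlen] using hbn)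
  rw [hY, hX]
  have hta : (s.take a).length = a := List.length_take_of_le (le_of_lt han)
  rw [List.take_append, List.drop_append, hta]
  have h2 : b - a = k + 1 := by omega
  have h3 : b + 1 - a = k + 2 := by omega
  have h4 : List.take b (List.take a s) = List.take a s := by
    rw [List.take_take]; congr 1; omega
  have h5 : List.drop (b + 1) (List.take a s) = [] := by
    apply List.drop_eq_nil_of_le; rw [hta]; omega
  have hbb : a + 1 + k = b := rfl
  simp [h2, h3, h4, h5, List.drop_drop, hbb,
        List.getD_eq_getElem?_getD, List.getElem?_eq_getElem hbn, List.getElem?_eq_getElem han]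

-- A's whole inner loop over js: appends the swap entries and their reverses, lis ends at s
theorem pc_inner (str1 : String) (i : Int) (js : List Int)
    (new m : List String) :
    js.foldl
      (fun (st2 : List String × List String × List Char) j =>
        let lis := st2.2.2
        let vi := PySem.List.pyGetD lis i ' '
        let vj := PySem.List.pyGetD lis j ' '
        let lis' := PySem.List.pySetD (PySem.List.pySetD lis i vj) j vi
        (st2.1 ++ [String.ofList lis'],
         st2.2.1 ++ [String.ofList lis'.reverse],
         str1.toList))
      (new, m, str1.toList) =
    (new ++ js.map (fun j => String.ofList (pvSwapA str1.toList i j)),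
     m ++ js.map (fun j => String.ofList (pvSwapA str1.toList i j).reverse),
     str1.toList) := by
  induction js generalizing new m with
  | nil => simp
  | cons j js ih => simp [List.foldl_cons, ih, pvSwapA]

-- A's whole outer loop
theorem pc_outer (str1 : String) (n : Int) (is : List Int)
    (new m : List String) :
    is.foldl
      (fun (st : List String × List String × List Char) i =>
        (PySem.List.pyRange (i + 1) n 1).foldl
          (fun (st2 : List String × List String × List Char) j =>
            let lis := st2.2.2
            let vi := PySem.List.pyGetD lis i ' '
            let vj := PySem.List.pyGetD lis j ' '
            let lis' := PySem.List.pySetD (PySem.List.pySetD lis i vj) j vi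
            (st2.1 ++ [String.ofList lis'],
             st2.2.1 ++ [String.ofList lis'.reverse],
             str1.toList))
          st)
      (new, m, str1.toList) =
    (new ++ is.flatMap (fun i => (PySem.List.pyRange (i + 1) n 1).map
              (fun j => String.ofList (pvSwapA str1.toList i j))),
     m ++ is.flatMap (fun i => (PySem.List.pyRange (i + 1) n 1).map
              (fun j => String.ofList (pvSwapA str1.toList i j).reverse)),
     str1.toList) := by
  induction is generalizing new m with
  | nil => simp
  | cons i is ih => rw [List.foldl_cons, pc_inner, ih]; simp

-- A's result normalised: flatMap/map over nat ranges of pvEntry (and its reverses)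
theorem pc_eq (str1 : String) :
    pc str1 =
      (List.range str1.toList.length).flatMap (fun i =>
        (List.range (str1.toList.length - (i+1))).map
          (fun k => String.ofList (pvEntry str1.toList i k)))
      ++ (List.range str1.toList.length).flatMap (fun i =>
        (List.range (str1.toList.length - (i+1))).map
          (fun k => String.ofList (pvEntry str1.toList i k).reverse)) := by
  unfold pc
  dsimp only
  rw [pc_outer]
  simp only [List.nil_append]
  have hr : PySem.List.pyRange 0 (PySem.Str.len str1) 1 =
      (List.range str1.toList.length).map (fun k => ((k : Nat) : Int)) := by
    rw [PySem.List.pyRange_one, PySem.Str.len_eq]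
    simp
  have key : ∀ i ∈ List.range str1.toList.length,
      ∀ g : List Char → String,
      (PySem.List.pyRange ((i : Int) + 1) (PySem.Str.len str1) 1).map
          (fun j => g (pvSwapA str1.toList (i : Int) j)) =
        (List.range (str1.toList.length - (i+1))).map
          (fun k => g (pvEntry str1.toList i k)) := by
    intro i hi g
    rw [List.mem_range] at hi
    rw [PySem.List.pyRange_one, PySem.Str.len_eq, List.map_map]
    have hlen : ((str1.toList.length : Int) - ((i : Int) + 1)).toNat
        = str1.toList.length - (i+1) := by omega
    rw [hlen]
    apply List.map_congr_left
    intro k hk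
    rw [List.mem_range] at hk
    have hc : (i : Int) + 1 + (k : Int) = ((i + 1 + k : Nat) : Int) := by push_cast; ring
    simp only [Function.comp_apply, hc]
    rw [pvSwap_eq_entry _ _ _ (by omega)]
  congr 1
  · rw [hr, List.flatMap_map]
    exact List.flatMap_congr (fun i hi => key i hi String.ofList)
  · rw [hr, List.flatMap_map]
    exact List.flatMap_congr (fun i hi => key i hi (fun l => String.ofList l.reverse))

-- B's inner recursion enumerates the splits of rest
theorem pcInner_eq (c : Char) (p : List Char) (rest : List Char) : ∀ (m : List Char),
    pcInner p c m rest = (List.range rest.length).map (fun k =>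
      String.ofList (p ++ [rest.getD k ' '] ++ m ++ rest.take k ++ [c] ++ rest.drop (k+1))) := by
  induction rest with
  | nil => intro m; simp [pcInner]
  | cons d t ih =>
    intro m
    rw [pcInner, ih (m ++ [d])]
    simp only [List.length_cons, List.range_succ_eq_map, List.map_cons, List.map_map]
    simp [Function.comp, Nat.succ_eq_add_one]

-- B's outer recursion over the string structure, in the common normal form
theorem pcSwaps_eq (rest : List Char) : ∀ (p : List Char),
    pcSwaps p rest = (List.range rest.length).flatMap (fun i =>
      (List.range (rest.length - (i+1))).map
        (fun k => String.ofList (p ++ pvEntry rest i k))) := by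
  induction rest with
  | nil => intro p; simp [pcSwaps]
  | cons c t ih =>
    intro p
    rw [pcSwaps, pcInner_eq, ih (p ++ [c])]
    simp only [List.length_cons, List.range_succ_eq_map, List.flatMap_cons, List.flatMap_map]
    congr 1
    · simp [pvEntry]
    · simp [Nat.succ_eq_add_one, pvEntry, Nat.succ_sub_succ]

theorem pc_alt_eq (str1 : String) :
    pc_alt str1 =
      (List.range str1.toList.length).flatMap (fun i =>
        (List.range (str1.toList.length - (i+1))).map
          (fun k => String.ofList (pvEntry str1.toList i k)))
      ++ (List.range str1.toList.length).flatMap (fun i =>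
        (List.range (str1.toList.length - (i+1))).map
          (fun k => String.ofList (pvEntry str1.toList i k).reverse)) := by
  unfold pc_alt
  dsimp only
  rw [pcSwaps_eq]
  simp only [List.nil_append]
  congr 1
  rw [List.map_flatMap]
  apply List.flatMap_congr
  intro i hi
  rw [List.map_map]
  apply List.map_congr_left
  intro k hk
  simp [String.toList_ofList]

-- ===== VERDICT (by name: the statement is the Claim_ definition above) =====
theorem pc_spec : Claim_equal_pc := by
  intro str1 _
  unfold Spec_pc
  rw [pc_eq, pc_alt_eq]
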